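-- pv_equiv track=rewrite | github.com/NightF0x007/PassGas | PassGas.py | add_special_chars
-- ===== SOURCE A (Python) =====
-- import itertools
--
-- DEFAULT_SPECIAL_CHARS = "~`!@#$%^&*()-_+={}[]|\\;:\"<>,./?"
--
-- def add_special_chars(word, special_chars=DEFAULT_SPECIAL_CHARS, max_special_repeats=3):
--     """Generate variations of a word with repeated special characters."""
--     variations = {word}
--     for repeat in range(1, max_special_repeats + 1):
--         for chars in itertools.product(special_chars, repeat=repeat):
--             char_combo = "".join(chars)
--             variations.add(f"{word}{char_combo}")
--             variations.add(f"{char_combo}{word}")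
--     return variations
-- ===== SOURCE B (Python) =====
-- DEFAULT_SPECIAL_CHARS = "~`!@#$%^&*()-_+={}[]|\\;:\"<>,./?"
--
-- def add_special_chars(word, special_chars=DEFAULT_SPECIAL_CHARS, max_special_repeats=3):
--     """Generate variations of a word with repeated special characters.
--
--     Uses bijective base-m numeration: the integers 1..m+m^2+...+m^k are in
--     one-to-one (shortlex) correspondence with the nonempty strings of length
--     at most k over the m special characters, so a single counting loop with a
--     divmod decode replaces the per-length cartesian-product enumeration."""
--     m = len(special_chars)
--     p, total = 1, 0
--     for _ in range(max_special_repeats):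
--         p *= m
--         total += p
--     variations = {word}
--     for n in range(1, total + 1):
--         combo = ""
--         while n:
--             n, d = divmod(n - 1, m)
--             combo = special_chars[d] + combo
--         variations.add(word + combo)
--         variations.add(combo + word)
--     return variations
-- ===== Notes on version B (the rewrite author's own statement) =====
-- stated objective: alternative
-- what changed: Replaces the per-length itertools.product enumeration with bijective base-m numeration: one counting loop over the integers 1..m+m^2+...+m^k, each decoded into its special-char combo by repeated divmod, instead of generating tuples length by length.
import Mathlib
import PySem

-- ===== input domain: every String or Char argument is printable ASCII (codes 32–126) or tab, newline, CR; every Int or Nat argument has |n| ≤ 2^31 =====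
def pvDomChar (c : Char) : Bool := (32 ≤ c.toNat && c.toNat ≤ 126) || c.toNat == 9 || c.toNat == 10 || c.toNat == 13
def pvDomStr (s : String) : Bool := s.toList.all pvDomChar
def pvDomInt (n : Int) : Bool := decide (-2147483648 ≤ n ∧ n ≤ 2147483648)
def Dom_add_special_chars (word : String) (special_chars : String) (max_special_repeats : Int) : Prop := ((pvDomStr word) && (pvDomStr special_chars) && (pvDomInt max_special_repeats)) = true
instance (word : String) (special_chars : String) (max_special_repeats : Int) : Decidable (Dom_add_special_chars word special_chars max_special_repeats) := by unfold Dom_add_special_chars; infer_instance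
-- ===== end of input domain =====

-- B enumerates the nonempty special-char combos by counting 1..m+m^2+...+m^k and
-- decoding each integer (bijective base-m, repeated divmod) instead of A's
-- per-length cartesian-product generation (alternative algorithm, same cost).


-- ===== PORT A =====
-- itertools.product(special_chars, repeat=r): tuples (as List Char) in product order,
-- leftmost position varying slowest.
def pvProdA (cs : List Char) : Nat → List (List Char)
  | 0 => [[]]
  | n + 1 => cs.flatMap (fun c => (pvProdA cs n).map (fun t => c :: t))

def add_special_chars (word : String) (special_chars : String) (max_special_repeats : Int) : List String :=
  (PySem.List.pyRange 1 (max_special_repeats + 1) 1).foldl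
    (fun variations r =>
      (pvProdA special_chars.toList r.toNat).foldl
        (fun v chars =>
          let char_combo := String.ofList chars
          PySem.Set.add (PySem.Set.add v (word ++ char_combo)) (char_combo ++ word))
        variations)
    (PySem.Set.ofList [word])

-- ===== PORT B =====
-- the `while n:` decode loop of Source B: n, d = divmod(n - 1, m); combo = special_chars[d] + combo.
-- For n ≥ 1 the pattern `n+1` makes divmod(n-1,m) the Nat pair (n / m, n % m); the index
-- n % m is < cs.length whenever it is reached, so getD is exact for Python's s[d].
def pvDecode (cs : List Char) : Nat → List Char → List Char
  | 0, acc => acc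
  | n + 1, acc => pvDecode cs (n / cs.length) (cs.getD (n % cs.length) ' ' :: acc)
  decreasing_by exact Nat.lt_succ_of_le (Nat.div_le_self n cs.length)

def add_special_chars_alt (word : String) (special_chars : String) (max_special_repeats : Int) : List String :=
  let m : Int := (special_chars.toList.length : Int)
  -- p, total = 1, 0; for _ in range(max_special_repeats): p *= m; total += p
  let st := (PySem.List.pyRange 0 max_special_repeats 1).foldl
    (fun (st : Int × Int) _ => (st.1 * m, st.2 + st.1 * m)) (1, 0)
  (PySem.List.pyRange 1 (st.2 + 1) 1).foldl
    (fun v n =>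
      let combo := String.ofList (pvDecode special_chars.toList n.toNat [])
      PySem.Set.add (PySem.Set.add v (word ++ combo)) (combo ++ word))
    (PySem.Set.ofList [word])

-- ===== PRECONDITION & SPEC =====
def Spec_add_special_chars (word : String) (special_chars : String) (max_special_repeats : Int) (out : List String) : Prop := out = add_special_chars_alt word special_chars max_special_repeats
instance (word : String) (special_chars : String) (max_special_repeats : Int) (out : List String) : Decidable (Spec_add_special_chars word special_chars max_special_repeats out) := by unfold Spec_add_special_chars; infer_instance

-- ===== CLAIM (what is proved, stated in full; the proofs are below) =====
def Claim_equal_add_special_chars : Prop := ∀ (word : String) (special_chars : String) (max_special_repeats : Int), Dom_add_special_chars word special_chars max_special_repeats → Spec_add_special_chars word special_chars max_special_repeats (add_special_chars word special_chars max_special_repeats)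

-- ===== LEMMAS AND PROOFS =====

-- append-form (no accumulator) version of the decode loop
def pvDecN (cs : List Char) : Nat → List Char
  | 0 => []
  | n + 1 => pvDecN cs (n / cs.length) ++ [cs.getD (n % cs.length) ' ']
  decreasing_by exact Nat.lt_succ_of_le (Nat.div_le_self n cs.length)

-- T m k = m + m^2 + ... + m^k, in the nested form the total-fold produces
def pvT (m : Nat) : Nat → Nat
  | 0 => 0
  | k + 1 => m * (pvT m k) + m

-- the length-(r) "padded digits" decode of j < m^r
def pvPad (cs : List Char) : Nat → Nat → List Char
  | 0, _ => []
  | r + 1, j => pvPad cs r (j / cs.length) ++ [cs.getD (j % cs.length) ' ']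

theorem pvDecode_eq_decN (cs : List Char) (n : Nat) (acc : List Char) :
    pvDecode cs n acc = pvDecN cs n ++ acc := by
  induction n using Nat.strong_induction_on generalizing acc with
  | _ n ih =>
    match n with
    | 0 => simp [pvDecode, pvDecN]
    | n + 1 =>
      rw [pvDecode, pvDecN, ih (n / cs.length) (Nat.lt_succ_of_le (Nat.div_le_self n cs.length))]
      simp

theorem pvT_succ_pow (m k : Nat) : pvT m (k + 1) = pvT m k + m ^ (k + 1) := by
  induction k with
  | zero => simp [pvT]
  | succ j ih =>
    calc pvT m (j + 1 + 1) = m * pvT m (j + 1) + m := rfl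
      _ = m * (pvT m j + m ^ (j + 1)) + m := by rw [ih]
      _ = (m * pvT m j + m) + m ^ (j + 1 + 1) := by ring
      _ = pvT m (j + 1) + m ^ (j + 1 + 1) := rfl

theorem pvProdA_snoc (cs : List Char) (n : Nat) :
    pvProdA cs (n + 1) = (pvProdA cs n).flatMap (fun t => cs.map (fun c => t ++ [c])) := by
  induction n with
  | zero => simp [pvProdA, List.map_eq_flatMap]
  | succ m ih =>
    conv_lhs =>
      rw [show pvProdA cs (m + 1 + 1)
            = cs.flatMap (fun c => (pvProdA cs (m + 1)).map (fun t => c :: t)) from rfl, ih]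
    conv_rhs =>
      rw [show pvProdA cs (m + 1)
            = cs.flatMap (fun c => (pvProdA cs m).map (fun t => c :: t)) from rfl]
    simp [List.flatMap_map, List.map_flatMap, List.flatMap_assoc, Function.comp_def]

theorem pv_map_getD_range {α : Type} (cs : List Char) (f : Char → α) :
    (List.range cs.length).map (fun i => f (cs.getD i ' ')) = cs.map f := by
  induction cs with
  | nil => simp
  | cons c t ih =>
    simp only [List.length_cons, List.range_succ_eq_map, List.map_cons, List.map_map]
    exact congrArg (f c :: ·) ih

theorem pv_range_mul (a b : Nat) :
    List.range (a * b) = (List.range a).flatMap (fun q => (List.range b).map (fun d => q * b + d)) := by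
  induction a with
  | zero => simp
  | succ n ih =>
    rw [Nat.succ_mul, List.range_add, List.range_succ, ih]
    simp [List.map_map]

theorem pv_pad_level (cs : List Char) (r : Nat) :
    (List.range (cs.length ^ (r + 1))).map (pvPad cs (r + 1)) = pvProdA cs (r + 1) := by
  induction r with
  | zero =>
    rcases Nat.eq_zero_or_pos cs.length with h | h
    · rw [pow_one, h]
      have : cs = [] := List.length_eq_zero_iff.mp h
      subst this; simp [pvProdA]
    · rw [pow_one]
      have h1 : (List.range cs.length).map (pvPad cs 1)
          = (List.range cs.length).map (fun j => [cs.getD j ' ']) := by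
        apply List.map_congr_left
        intro j hj
        have hj' := List.mem_range.mp hj
        simp [pvPad, Nat.div_eq_of_lt hj', Nat.mod_eq_of_lt hj']
      rw [h1, pv_map_getD_range cs (fun c => [c])]
      show cs.map (fun c => [c]) = pvProdA cs 1
      rw [show pvProdA cs 1 = cs.flatMap (fun c => [[c]]) by simp [pvProdA]]
      clear h h1
      induction cs with
      | nil => rfl
      | cons a t iht => simpa using iht
  | succ r ih =>
    rcases Nat.eq_zero_or_pos cs.length with h | h
    · have : cs = [] := List.length_eq_zero_iff.mp h
      subst this; simp [pvProdA]
    · rw [pow_succ, pv_range_mul, pvProdA_snoc]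
      rw [← ih]
      simp only [List.flatMap_map, List.map_flatMap, List.map_map]
      apply List.flatMap_congr
      intro q _
      have h1 : ∀ d ∈ List.range cs.length,
          pvPad cs (r + 1 + 1) (q * cs.length + d) = pvPad cs (r + 1) q ++ [cs.getD d ' '] := by
        intro d hd
        have hd' := List.mem_range.mp hd
        have hdiv : (q * cs.length + d) / cs.length = q := by
          rw [Nat.add_comm, Nat.add_mul_div_right _ _ h, Nat.div_eq_of_lt hd', Nat.zero_add]
        have hmod : (q * cs.length + d) % cs.length = d := by
          rw [Nat.add_comm, Nat.add_mul_mod_self_right, Nat.mod_eq_of_lt hd']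
        show pvPad cs (r + 1) ((q * cs.length + d) / cs.length)
              ++ [cs.getD ((q * cs.length + d) % cs.length) ' '] = _
        rw [hdiv, hmod]
      simp only [Function.comp_def]
      rw [List.map_congr_left h1]
      have := pv_map_getD_range cs (fun c => pvPad cs (r + 1) q ++ [c])
      simpa [List.map_map] using this

theorem pv_decN_key (cs : List Char) (r : Nat) :
    ∀ j < cs.length ^ (r + 1), pvDecN cs (pvT cs.length r + j + 1) = pvPad cs (r + 1) j := by
  induction r with
  | zero =>
    intro j hj
    rw [pow_one] at hj
    show pvDecN cs (0 + j + 1) = _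
    rw [Nat.zero_add, pvDecN, Nat.div_eq_of_lt hj]
    simp [pvDecN, pvPad]
  | succ r ih =>
    intro j hj
    have hm : 0 < cs.length := by
      rcases Nat.eq_zero_or_pos cs.length with h | h
      · rw [h] at hj; simp at hj
      · exact h
    have hT : pvT cs.length (r + 1) + j = cs.length * (pvT cs.length r + 1) + j := by
      show cs.length * pvT cs.length r + cs.length + j = _
      ring
    rw [pvDecN, hT]
    have hdiv : (cs.length * (pvT cs.length r + 1) + j) / cs.length
        = pvT cs.length r + 1 + j / cs.length := by
      rw [Nat.mul_add_div hm]
    have hmod : (cs.length * (pvT cs.length r + 1) + j) % cs.length = j % cs.length := by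
      rw [Nat.mul_add_mod]
    rw [hdiv, hmod]
    have hjd : j / cs.length < cs.length ^ (r + 1) := by
      rw [pow_succ] at hj
      exact Nat.div_lt_of_lt_mul (by rw [Nat.mul_comm] at hj; exact hj)
    have := ih (j / cs.length) hjd
    rw [show pvT cs.length r + 1 + j / cs.length = pvT cs.length r + j / cs.length + 1 by ring, this]
    rfl

-- the counting enumeration equals the concatenation of the per-length products
theorem pv_dec_enum (cs : List Char) (k : Nat) :
    (List.range (pvT cs.length k)).map (fun i => pvDecN cs (i + 1))
      = (List.range k).flatMap (fun r => pvProdA cs (r + 1)) := by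
  induction k with
  | zero => simp [pvT]
  | succ k ih =>
    rw [pvT_succ_pow, List.range_add, List.range_succ]
    simp only [List.map_append, List.flatMap_append, List.map_map, ih]
    congr 1
    have h1 : (List.range (cs.length ^ (k + 1))).map
          ((fun i => pvDecN cs (i + 1)) ∘ (fun i => pvT cs.length k + i))
        = (List.range (cs.length ^ (k + 1))).map (pvPad cs (k + 1)) := by
      apply List.map_congr_left
      intro j hj
      show pvDecN cs (pvT cs.length k + j + 1) = pvPad cs (k + 1) j
      exact pv_decN_key cs k j (List.mem_range.mp hj)
    simp only [Function.comp_def] at h1 ⊢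
    rw [h1, pv_pad_level]
    simp

theorem pv_foldl_flatMap {α β γ : Type} (l : List α) (g : α → List β) (f : γ → β → γ) (init : γ) :
    (l.flatMap g).foldl f init = l.foldl (fun acc x => (g x).foldl f acc) init := by
  induction l generalizing init with
  | nil => rfl
  | cons x t ih => simp [List.flatMap_cons, List.foldl_append, ih]

-- the B-side total fold computes (m^n, pvT m n) over ℤ
theorem pv_total_fold (m : Int) (n : Nat) (hm : 0 ≤ m) :
    (List.range n).foldl (fun (st : Int × Int) (_ : Nat) => (st.1 * m, st.2 + st.1 * m)) (1, 0)
      = ((m ^ n : Int), ((pvT m.toNat n : Nat) : Int)) := by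
  induction n with
  | zero => simp [pvT]
  | succ j ih =>
    rw [List.range_succ, List.foldl_append, ih]
    simp only [List.foldl_cons, List.foldl_nil, Prod.mk.injEq]
    have hmm : ((m.toNat : Int)) = m := Int.toNat_of_nonneg hm
    refine ⟨by rw [← pow_succ], ?_⟩
    rw [pvT_succ_pow]
    push_cast
    rw [hmm, ← pow_succ]

-- ===== VERDICT (by name: the statement is the Claim_ definition above) =====
theorem add_special_chars_spec : Claim_equal_add_special_chars := by
  intro word special_chars k _
  show add_special_chars word special_chars k = add_special_chars_alt word special_chars k
  unfold add_special_chars add_special_chars_alt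
  simp only [PySem.List.pyRange_one, List.foldl_map, Int.add_sub_cancel, Int.sub_zero]
  rw [pv_total_fold (special_chars.toList.length : Int) k.toNat (by positivity)]
  simp only [Int.toNat_natCast]
  trans ((List.range k.toNat).flatMap (fun r => pvProdA special_chars.toList (r + 1))).foldl
    (fun v chars =>
      PySem.Set.add (PySem.Set.add v (word ++ String.ofList chars)) (String.ofList chars ++ word))
    (PySem.Set.ofList [word])
  · rw [pv_foldl_flatMap]
    apply PySem.List.foldl_congr_mem
    intro v i _
    have h1 : ((1 : Int) + (i : Int)).toNat = i + 1 := by omega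
    rw [h1]
  · rw [← pv_dec_enum, List.foldl_map]
    apply PySem.List.foldl_congr_mem
    intro v i _
    have h1 : ((1 : Int) + (i : Int)).toNat = i + 1 := by omega
    rw [h1, pvDecode_eq_decN, List.append_nil]
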